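-- pv_equiv track=rewrite | github.com/Kwakcena/daily-ps | 20200116/primenumber_test.py | prime_case
-- ===== SOURCE A (Python) =====
-- from itertools import combinations
--
-- def primes(sorted_numbers):
--     max_number = sum(sorted_numbers[-3:])
--     prime_numbers = set(range(2, max_number + 1))
--     for i in range(2, max_number + 1):
--         if i not in prime_numbers:
--             continue
--         prime_numbers -= set(range(i * 2, max_number + 1, i))
--     return prime_numbers
--
-- def prime_case(numbers):
--     sorted_numbers = sorted(numbers)
--     prime_numbers = primes(sorted_numbers)
--     return [
--         xs
--         for xs in combinations(sorted_numbers, 3)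
--         if sum(xs) in prime_numbers
--     ]
-- ===== SOURCE B (Python) =====
-- from itertools import combinations
--
-- def is_prime(n):
--     if n < 2:
--         return False
--     return all(n % d != 0 for d in range(2, n))
--
-- def prime_case(numbers):
--     sorted_numbers = sorted(numbers)
--     return [xs for xs in combinations(sorted_numbers, 3) if is_prime(sum(xs))]
-- ===== Notes on version B (the rewrite author's own statement) =====
-- stated objective: simpler
-- what changed: Dropped the Eratosthenes sieve and the prime table over set(range(2, sum(top3)+1)); each candidate sum is instead tested directly for primality by trial division, with the sorted-combination iteration order unchanged.
import Mathlib
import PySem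

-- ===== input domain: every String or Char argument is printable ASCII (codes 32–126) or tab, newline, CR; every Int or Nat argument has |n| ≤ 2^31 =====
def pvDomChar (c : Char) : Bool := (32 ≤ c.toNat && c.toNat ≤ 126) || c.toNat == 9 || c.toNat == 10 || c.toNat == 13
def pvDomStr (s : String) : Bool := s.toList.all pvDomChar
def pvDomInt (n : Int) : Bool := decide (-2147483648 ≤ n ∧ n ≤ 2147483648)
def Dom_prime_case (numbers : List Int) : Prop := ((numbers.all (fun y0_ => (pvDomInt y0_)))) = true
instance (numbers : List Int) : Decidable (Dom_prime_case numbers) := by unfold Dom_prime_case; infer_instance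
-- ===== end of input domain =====

-- B replaces A's Eratosthenes sieve over set(range(2, sum(top3)+1)) by per-candidate
-- trial division, keeping the same sorted 3-combination order; return values are equal.

-- ===== PORT A =====
-- itertools.combinations(xs, 3) in its index-lexicographic order (library call, shared by both ports)
def pvCombos2 : List Int → List (List Int)
  | [] => []
  | x :: t => (t.map (fun y => [x, y])) ++ pvCombos2 t

def pvCombos3 : List Int → List (List Int)
  | [] => []
  | x :: t => ((pvCombos2 t).map (fun p => x :: p)) ++ pvCombos3 t

-- primes(sorted_numbers): the same sieve loop, with the Python set held as a hash set
-- (Std.HashSet: membership and removal only — the set's hash iteration order is never used,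
-- matching Python, whose set here is only built, subtracted from and queried);
-- 'prime_numbers -= set(range(i*2, max_number+1, i))' removes each listed multiple.
def pvPrimesA (sorted_numbers : List Int) : Std.HashSet Int :=
  let max_number : Int := (PySem.List.slice sorted_numbers (some (-3)) none).sum
  let init : Std.HashSet Int := Std.HashSet.ofList (PySem.List.pyRange 2 (max_number + 1) 1)
  (PySem.List.pyRange 2 (max_number + 1) 1).foldl
    (fun prime_numbers i =>
      if prime_numbers.contains i then
        (PySem.List.pyRange (i * 2) (max_number + 1) i).foldl
          (fun s j => s.erase j) prime_numbers
      else prime_numbers)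
    init

def prime_case (numbers : List Int) : List (List Int) :=
  let sorted_numbers := PySem.List.sorted numbers (fun x => x)
  let prime_numbers := pvPrimesA sorted_numbers
  (pvCombos3 sorted_numbers).filter (fun xs => prime_numbers.contains xs.sum)

-- ===== PORT B =====
-- is_prime(n): trial division, all(n % d != 0 for d in range(2, n))
def pvIsPrime (n : Int) : Bool :=
  if n < 2 then false
  else (PySem.List.pyRange 2 n 1).all (fun d => !(PySem.Int.mod n d == 0))

def prime_case_alt (numbers : List Int) : List (List Int) :=
  let sorted_numbers := PySem.List.sorted numbers (fun x => x)
  (pvCombos3 sorted_numbers).filter (fun xs => pvIsPrime xs.sum)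

-- ===== PRECONDITION & SPEC =====
-- A is total; no Pre_ is needed.
def Spec_prime_case (numbers : List Int) (out : List (List Int)) : Prop := out = prime_case_alt numbers
instance (numbers : List Int) (out : List (List Int)) : Decidable (Spec_prime_case numbers out) := by unfold Spec_prime_case; infer_instance

-- ===== CLAIM (what is proved, stated in full; the proofs are below) =====
def Claim_equal_prime_case : Prop := ∀ (numbers : List Int), Dom_prime_case numbers → Spec_prime_case numbers (prime_case numbers)

-- ===== LEMMAS AND PROOFS =====

-- proof-side names for the pieces of A's sieve
def pvMax (s : List Int) : Int := (PySem.List.slice s (some (-3)) none).sum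

def pvStep (M : Int) (s : Std.HashSet Int) (i : Int) : Std.HashSet Int :=
  if s.contains i then
    (PySem.List.pyRange (i * 2) (M + 1) i).foldl (fun s j => s.erase j) s
  else s

def pvSieve (M k : Int) : Std.HashSet Int :=
  (PySem.List.pyRange 2 k 1).foldl (pvStep M) (Std.HashSet.ofList (PySem.List.pyRange 2 (M + 1) 1))

-- "n has no proper divisor ≥ 2"
def pvNoDiv (n : Int) : Prop := ∀ d : Int, 2 ≤ d → d ∣ n → d = n

lemma pvPrimesA_eq (s : List Int) : pvPrimesA s = pvSieve (pvMax s) (pvMax s + 1) := rfl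

-- erasing every element of a list from a hash set
lemma pv_mem_foldl_erase (l : List Int) : ∀ (s : Std.HashSet Int) (x : Int),
    (x ∈ l.foldl (fun s j => s.erase j) s) ↔ (x ∈ s ∧ x ∉ l) := by
  induction l with
  | nil => intro s x; simp
  | cons j t ih =>
    intro s x
    simp only [List.foldl_cons, ih, Std.HashSet.mem_erase, List.mem_cons,
      beq_eq_false_iff_ne, ne_eq]
    constructor
    · rintro ⟨⟨hne, hx⟩, hnt⟩
      exact ⟨hx, by rintro (rfl | h); exacts [hne rfl, hnt h]⟩
    · rintro ⟨hx, hnot⟩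
      exact ⟨⟨fun h => hnot (Or.inl h.symm), hx⟩, fun h => hnot (Or.inr h)⟩

lemma pv_mem_ofList (l : List Int) (x : Int) : x ∈ Std.HashSet.ofList l ↔ x ∈ l := by
  rw [Std.HashSet.mem_ofList]
  simp

-- membership in range(i*2, M+1, i) for i ≥ 2 is 'multiple of i in [2i, M]'
lemma pv_mem_mult (M i n : Int) (hi : 2 ≤ i) :
    n ∈ PySem.List.pyRange (i * 2) (M + 1) i ↔ (i ∣ n ∧ i * 2 ≤ n ∧ n ≤ M) := by
  rw [PySem.List.mem_pyRange_iff_of_pos (by omega)]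
  constructor
  · rintro ⟨h1, h2, h3⟩
    refine ⟨?_, h1, by omega⟩
    have h4 : i ∣ (n - i * 2) + i * 2 := dvd_add h3 ⟨2, by ring⟩
    simpa using h4
  · rintro ⟨h1, h2, h3⟩
    exact ⟨h2, by omega, dvd_sub h1 ⟨2, by ring⟩⟩

-- if d ∣ n, d ≥ 2, n ≥ 2 and n ≠ d, then n ≥ 2d
lemma pv_two_mul_le (d n : Int) (hd : 2 ≤ d) (hn : 2 ≤ n) (hdvd : d ∣ n) (hne : n ≠ d) :
    d * 2 ≤ n := by
  obtain ⟨t, ht⟩ := hdvd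
  have h1t : 1 ≤ t := by nlinarith
  have h2t : 2 ≤ t := by
    rcases eq_or_lt_of_le h1t with h | h
    · exfalso; apply hne; rw [ht, ← h, mul_one]
    · omega
  nlinarith

-- sieve invariant: after processing i = 2..k-1, the set holds exactly the n ∈ [2, M]
-- with no proper divisor in [2, k)
lemma pvSieve_mem (M : Int) : ∀ k, 2 ≤ k → ∀ n : Int,
    (n ∈ pvSieve M k ↔ (2 ≤ n ∧ n ≤ M ∧ ∀ d, 2 ≤ d → d < k → d ∣ n → d = n)) := by
  intro k hk
  induction k, hk using Int.le_induction with
  | base =>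
    intro n
    unfold pvSieve
    rw [show PySem.List.pyRange (2:Int) 2 1 = [] from PySem.List.pyRange_one_eq_nil (by omega)]
    simp only [List.foldl_nil]
    rw [pv_mem_ofList, PySem.List.mem_pyRange_one]
    constructor
    · rintro ⟨h1, h2⟩
      exact ⟨h1, by omega, fun d hd hdk => by omega⟩
    · rintro ⟨h1, h2, _⟩
      exact ⟨h1, by omega⟩
  | succ k hk IH =>
    intro n
    have hsplit : pvSieve M (k + 1) = pvStep M (pvSieve M k) k := by
      unfold pvSieve
      rw [PySem.List.pyRange_one_succ_right (by omega : (2:Int) ≤ k), List.foldl_append]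
      rfl
    rw [hsplit]
    unfold pvStep
    by_cases hc : (pvSieve M k).contains k = true
    · rw [if_pos hc]
      rw [pv_mem_foldl_erase, pv_mem_mult M k n (by omega), IH n]
      constructor
      · rintro ⟨⟨h2n, hnM, hdiv⟩, hnot⟩
        refine ⟨h2n, hnM, fun d hd hdk1 hddvd => ?_⟩
        rcases lt_or_eq_of_le (by omega : d ≤ k) with hlt | heq
        · exact hdiv d hd hlt hddvd
        · subst heq
          by_contra hne
          have h2k : d * 2 ≤ n := pv_two_mul_le d n hd h2n hddvd (fun h => hne h.symm)
          exact hnot ⟨hddvd, h2k, hnM⟩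
      · rintro ⟨h2n, hnM, hdiv⟩
        refine ⟨⟨h2n, hnM, fun d hd hdk hddvd => hdiv d hd (by omega) hddvd⟩, ?_⟩
        rintro ⟨hkdvd, h2k, _⟩
        have hkn := hdiv k (by omega) (by omega) hkdvd
        omega
    · rw [if_neg hc]
      rw [IH n]
      have hknot : ¬ (2 ≤ k ∧ k ≤ M ∧ ∀ d, 2 ≤ d → d < k → d ∣ k → d = k) := by
        intro hcon
        exact hc (Std.HashSet.contains_iff_mem.mpr ((IH k).mpr hcon))
      constructor
      · rintro ⟨h2n, hnM, hdiv⟩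
        refine ⟨h2n, hnM, fun d hd hdk1 hddvd => ?_⟩
        rcases lt_or_eq_of_le (by omega : d ≤ k) with hlt | heq
        · exact hdiv d hd hlt hddvd
        · subst heq
          by_cases hkM : d ≤ M
          · push Not at hknot
            obtain ⟨e, he2, hek, hedvd, hene⟩ := hknot hd hkM
            have hkn : d ≤ n := Int.le_of_dvd (by omega) hddvd
            have hen : e = n := hdiv e he2 (by omega) (hedvd.trans hddvd)
            omega
          · have hkn : d ≤ n := Int.le_of_dvd (by omega) hddvd
            omega
      · rintro ⟨h2n, hnM, hdiv⟩
        exact ⟨h2n, hnM, fun d hd hdk hddvd => hdiv d hd (by omega) hddvd⟩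

-- characterisation of A's prime set, for n bounded by the sieve limit
lemma pvPrimesA_mem (s : List Int) (n : Int) (hn : n ≤ pvMax s) :
    ((pvPrimesA s).contains n = true) ↔ (2 ≤ n ∧ pvNoDiv n) := by
  rw [Std.HashSet.contains_iff_mem, pvPrimesA_eq]
  by_cases hM : 1 ≤ pvMax s
  · rw [pvSieve_mem (pvMax s) (pvMax s + 1) (by omega) n]
    constructor
    · rintro ⟨h2, _, hdiv⟩
      refine ⟨h2, fun d hd hddvd => ?_⟩
      have hdn : d ≤ n := Int.le_of_dvd (by omega) hddvd
      exact hdiv d hd (by omega) hddvd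
    · rintro ⟨h2, hdiv⟩
      exact ⟨h2, hn, fun d hd _ hddvd => hdiv d hd hddvd⟩
  · constructor
    · intro hmem
      exfalso
      unfold pvSieve at hmem
      rw [PySem.List.pyRange_one_eq_nil (by omega)] at hmem
      simp only [List.foldl_nil] at hmem
      rw [pv_mem_ofList] at hmem
      simp at hmem
    · rintro ⟨h2, _⟩
      omega

-- B's trial division tests exactly 'no proper divisor'
lemma pvIsPrime_iff (n : Int) : pvIsPrime n = true ↔ (2 ≤ n ∧ pvNoDiv n) := by
  unfold pvIsPrime
  by_cases h2 : n < 2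
  · rw [if_pos h2]
    simp only [Bool.false_eq_true, false_iff]
    rintro ⟨h, _⟩
    omega
  · rw [if_neg h2]
    push Not at h2
    rw [List.all_eq_true]
    constructor
    · intro hall
      refine ⟨h2, fun d hd hdvd => ?_⟩
      by_contra hne
      have hdn : d ≤ n := Int.le_of_dvd (by omega) hdvd
      have hmem : d ∈ PySem.List.pyRange 2 n 1 :=
        PySem.List.mem_pyRange_one.mpr ⟨hd, by omega⟩
      have hne0 : PySem.Int.mod n d ≠ 0 := by simpa using hall d hmem
      exact hne0 ((PySem.Int.mod_eq_zero_iff_dvd n d).mpr hdvd)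
    · rintro ⟨_, hnd⟩ d hmem
      rw [PySem.List.mem_pyRange_one] at hmem
      have hnotdvd : ¬ d ∣ n := by
        intro hdvd
        have := hnd d hmem.1 hdvd
        omega
      simpa [PySem.Int.mod_eq_zero_iff_dvd] using hnotdvd

-- combinations produce length-2 / length-3 sublists
lemma pvCombos2_spec : ∀ (s l : List Int), l ∈ pvCombos2 s → l.Sublist s ∧ l.length = 2 := by
  intro s
  induction s with
  | nil => intro l hl; simp [pvCombos2] at hl
  | cons x t ih =>
    intro l hl
    simp only [pvCombos2, List.mem_append, List.mem_map] at hl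
    rcases hl with ⟨y, hy, rfl⟩ | hl
    · exact ⟨List.Sublist.cons₂ x (List.singleton_sublist.mpr hy), rfl⟩
    · obtain ⟨h1, h2⟩ := ih l hl
      exact ⟨h1.cons x, h2⟩

lemma pvCombos3_spec : ∀ (s l : List Int), l ∈ pvCombos3 s → l.Sublist s ∧ l.length = 3 := by
  intro s
  induction s with
  | nil => intro l hl; simp [pvCombos3] at hl
  | cons x t ih =>
    intro l hl
    simp only [pvCombos3, List.mem_append, List.mem_map] at hl
    rcases hl with ⟨p, hp, rfl⟩ | hl
    · obtain ⟨h1, h2⟩ := pvCombos2_spec t p hp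
      exact ⟨List.Sublist.cons₂ x h1, by simp [h2]⟩
    · obtain ⟨h1, h2⟩ := ih l hl
      exact ⟨h1.cons x, h2⟩

-- in a sorted list, any sublist's sum is at most the sum of the suffix of the same length
lemma pv_sum_sublist_le : ∀ (l s : List Int), l.Sublist s → s.Pairwise (· ≤ ·) →
    l.sum ≤ (s.drop (s.length - l.length)).sum := by
  intro l s hl
  induction hl with
  | slnil => intro _; simp
  | @cons l s a hsub ih =>
    intro hp
    have ih' := ih (List.Pairwise.of_cons hp)
    simp only [List.length_cons]
    rw [show s.length + 1 - l.length = (s.length - l.length) + 1 from by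
      have := hsub.length_le; omega, List.drop_succ_cons]
    exact ih'
  | @cons₂ l s a hsub ih =>
    intro hp
    have hale : ∀ y ∈ s, a ≤ y := (List.pairwise_cons.mp hp).1
    have ih' := ih (List.Pairwise.of_cons hp)
    have hll : l.length ≤ s.length := hsub.length_le
    simp only [List.length_cons]
    rw [show s.length + 1 - (l.length + 1) = s.length - l.length from by omega]
    rcases eq_or_lt_of_le hll with heq | hlt
    · have hls : l = s := hsub.eq_of_length heq
      subst hls
      simp
    · rw [show s.length - l.length = (s.length - l.length - 1) + 1 from by omega,
        List.drop_succ_cons]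
      set m := s.length - l.length - 1 with hm
      have hne : s.drop m ≠ [] := by
        intro hnil
        have := List.drop_eq_nil_iff.mp hnil
        omega
      obtain ⟨y, t, hyt⟩ := List.exists_cons_of_ne_nil hne
      have hy_mem : y ∈ s := List.mem_of_mem_drop (by rw [hyt]; exact List.mem_cons_self ..)
      have ht : t = s.drop (m + 1) := by
        have h1 : s.drop (m + 1) = (s.drop m).drop 1 := by
          rw [List.drop_drop]
        rw [h1, hyt]
        rfl
      have hmsum : l.sum ≤ (s.drop (m + 1)).sum := by
        rw [show m + 1 = s.length - l.length from by omega]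
        exact ih'
      calc (a :: l).sum = a + l.sum := by simp
        _ ≤ y + (s.drop (m + 1)).sum := add_le_add (hale y hy_mem) hmsum
        _ = (s.drop m).sum := by rw [hyt, ht]; simp

-- ===== VERDICT (by name: the statement is the Claim_ definition above) =====
theorem prime_case_spec : Claim_equal_prime_case := by
  unfold Claim_equal_prime_case
  intro numbers _
  unfold Spec_prime_case
  simp only [prime_case, prime_case_alt]
  apply List.filter_congr
  intro xs hxs
  obtain ⟨hsub, hlen⟩ := pvCombos3_spec _ xs hxs
  have hpair : (PySem.List.sorted numbers (fun x => x)).Pairwise (· ≤ ·) := by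
    have h := PySem.List.sorted_pairwise numbers (fun x => x)
    simpa using h
  have hsum : xs.sum ≤ pvMax (PySem.List.sorted numbers (fun x => x)) := by
    have hb := pv_sum_sublist_le xs _ hsub hpair
    rw [hlen] at hb
    unfold pvMax
    rw [PySem.List.slice_from_neg_ofNat _ 3 (by omega)]
    exact hb
  have hA := pvPrimesA_mem (PySem.List.sorted numbers (fun x => x)) xs.sum hsum
  have hB := pvIsPrime_iff xs.sum
  have hiff := hA.trans hB.symm
  exact Bool.coe_iff_coe.mp hiff
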